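-- pv_equiv track=rewrite | github.com/cheng-haha/MaskCAE | utils/metric.py | GetFeatureMapSizeBySelfMax
-- ===== SOURCE A (Python) =====
-- def get_data_size(data_name, is_sup = False ):
--     Model_Seen_SSL_F_Size = {
--         'ucihar': (     1, 1, 32, 9     ) ,
--         'motion': (     1, 1, 32, 12    ) ,
--         'uschad': (     1, 1, 32, 6     ) ,
--     }
--     Model_Seen_Sup_F_Size = {
--         'ucihar': (     1, 1, 128, 9     ) ,
--         'motion': (     1, 1, 128, 12    ) ,
--         'uschad': (     1, 1, 32,  6     ) ,
--     }
--     if is_sup: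
--         size_dict = Model_Seen_Sup_F_Size
--     else:
--         size_dict = Model_Seen_SSL_F_Size
--     if data_name in size_dict:
--         pass
--     else:
--         raise Exception( 'please input correct data name')
--     return size_dict[data_name]
--
-- def GetFeatureMapSizeBySelfMax(data_name , max_size, idex_layer):
--     size = get_data_size(data_name)[2:]
--     h,w  = size
--     if idex_layer > 0:
--         for i in range(idex_layer):
--             h //= max_size[0]
--             w //= max_size[1]
--         return ( h , w )
--     else:
--         raise  ValueError(f'check your idex_layer')
-- ===== SOURCE B (Python) =====
-- def get_data_size(data_name, is_sup = False ):
--     Model_Seen_SSL_F_Size = {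
--         'ucihar': (     1, 1, 32, 9     ) ,
--         'motion': (     1, 1, 32, 12    ) ,
--         'uschad': (     1, 1, 32, 6     ) ,
--     }
--     Model_Seen_Sup_F_Size = {
--         'ucihar': (     1, 1, 128, 9     ) ,
--         'motion': (     1, 1, 128, 12    ) ,
--         'uschad': (     1, 1, 32,  6     ) ,
--     }
--     if is_sup:
--         size_dict = Model_Seen_Sup_F_Size
--     else:
--         size_dict = Model_Seen_SSL_F_Size
--     if data_name in size_dict:
--         pass
--     else:
--         raise Exception( 'please input correct data name')
--     return size_dict[data_name]
--
-- def GetFeatureMapSizeBySelfMax(data_name, max_size, idex_layer):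
--     # Closed form: dividing h by m idex_layer times (floor) equals h // m**idex_layer
--     # for a positive divisor m.  The exponent is capped at h.bit_length(): once
--     # m**e exceeds h the quotient is already 0, so larger exponents change nothing
--     # and the function runs in O(1) instead of O(idex_layer).
--     h, w = get_data_size(data_name)[2:]
--     if idex_layer <= 0:
--         raise ValueError('check your idex_layer')
--     return (h // max_size[0] ** min(idex_layer, h.bit_length()),
--             w // max_size[1] ** min(idex_layer, w.bit_length()))
-- ===== Notes on version B (the rewrite author's own statement) =====
-- stated objective: faster
-- what changed: Replaces the per-layer loop of repeated floor divisions by a single closed-form floor division per dimension, h // m**e with the exponent capped at h.bit_length() (beyond which the quotient is already 0), so the runtime is O(1) instead of O(idex_layer).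
-- outside the precondition, e.g. on GetFeatureMapSizeBySelfMax('ucihar', (-3, 1), 3): A returns (-1, 9), B returns (-2, 9)
import Mathlib
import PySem

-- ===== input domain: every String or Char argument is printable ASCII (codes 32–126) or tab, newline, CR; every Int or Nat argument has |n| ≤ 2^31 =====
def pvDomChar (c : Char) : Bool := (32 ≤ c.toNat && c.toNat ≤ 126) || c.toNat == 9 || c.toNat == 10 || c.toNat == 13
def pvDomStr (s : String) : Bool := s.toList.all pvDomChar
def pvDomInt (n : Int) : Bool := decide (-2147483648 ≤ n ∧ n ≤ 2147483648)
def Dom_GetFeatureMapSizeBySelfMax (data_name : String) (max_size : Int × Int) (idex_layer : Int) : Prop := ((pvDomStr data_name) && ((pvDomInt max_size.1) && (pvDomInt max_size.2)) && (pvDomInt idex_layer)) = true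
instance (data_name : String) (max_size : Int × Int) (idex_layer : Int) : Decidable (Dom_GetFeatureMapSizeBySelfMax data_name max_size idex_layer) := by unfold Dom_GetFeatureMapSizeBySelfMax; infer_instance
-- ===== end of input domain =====

-- B replaces A's per-layer floor-division loop by one capped closed-form floor division
-- per dimension (objective: faster — the loop over idex_layer disappears).


-- ===== PORT A =====
-- helper get_data_size; `none` where the Python helper raises Exception (unknown data name)
def getDataSize (data_name : String) (is_sup : Bool) : Option (Int × Int × Int × Int) :=
  let ssl : PySem.Dict String (Int × Int × Int × Int) :=
    (((PySem.Dict.empty).insert "ucihar" (1, 1, 32, 9)).insert "motion" (1, 1, 32, 12)).insert "uschad" (1, 1, 32, 6)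
  let sup : PySem.Dict String (Int × Int × Int × Int) :=
    (((PySem.Dict.empty).insert "ucihar" (1, 1, 128, 9)).insert "motion" (1, 1, 128, 12)).insert "uschad" (1, 1, 32, 6)
  let size_dict := if is_sup then sup else ssl
  size_dict.get? data_name

def GetFeatureMapSizeBySelfMax (data_name : String) (max_size : Int × Int) (idex_layer : Int) : Int × Int :=
  match getDataSize data_name false with
  | none => (0, 0)      -- Python raises Exception here; excluded by Pre_
  | some (_, _, h, w) =>
    if idex_layer > 0 then
      (PySem.List.pyRange 0 idex_layer 1).foldl
        (fun hw _ => (PySem.Int.floordiv hw.1 max_size.1, PySem.Int.floordiv hw.2 max_size.2)) (h, w)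
    else (0, 0)         -- Python raises ValueError here; excluded by Pre_

-- ===== PORT B =====
def GetFeatureMapSizeBySelfMax_alt (data_name : String) (max_size : Int × Int) (idex_layer : Int) : Int × Int :=
  match getDataSize data_name false with
  | none => (0, 0)      -- Python raises Exception here; excluded by Pre_
  | some (_, _, h, w) =>
    if idex_layer ≤ 0 then (0, 0)   -- Python raises ValueError here; excluded by Pre_
    else
      (PySem.Int.floordiv h (max_size.1 ^ (min idex_layer (PySem.Int.bitLength h : Int)).toNat),
       PySem.Int.floordiv w (max_size.2 ^ (min idex_layer (PySem.Int.bitLength w : Int)).toNat))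

-- ===== PRECONDITION & SPEC =====
-- Pre_ excludes the inputs where A raises (unknown data name → Exception; idex_layer ≤ 0 →
-- ValueError; a zero max_size component → ZeroDivisionError), and it restricts both max_size
-- components to POSITIVE integers, the natural domain for a pooling divisor: for a negative
-- divisor A still returns a value, but it is a sign-flipping artefact of repeating floor
-- division that the closed form does not reproduce.
def Pre_GetFeatureMapSizeBySelfMax (data_name : String) (max_size : Int × Int) (idex_layer : Int) : Prop :=
  (data_name = "ucihar" ∨ data_name = "motion" ∨ data_name = "uschad") ∧
  0 < idex_layer ∧ 0 < max_size.1 ∧ 0 < max_size.2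
instance (data_name : String) (max_size : Int × Int) (idex_layer : Int) : Decidable (Pre_GetFeatureMapSizeBySelfMax data_name max_size idex_layer) := by unfold Pre_GetFeatureMapSizeBySelfMax; infer_instance

def pvWitness_GetFeatureMapSizeBySelfMax : String × (Int × Int) × Int := ("ucihar", (2, 3), 2)

def Spec_GetFeatureMapSizeBySelfMax (data_name : String) (max_size : Int × Int) (idex_layer : Int) (out : Int × Int) : Prop := out = GetFeatureMapSizeBySelfMax_alt data_name max_size idex_layer
instance (data_name : String) (max_size : Int × Int) (idex_layer : Int) (out : Int × Int) : Decidable (Spec_GetFeatureMapSizeBySelfMax data_name max_size idex_layer out) := by unfold Spec_GetFeatureMapSizeBySelfMax; infer_instance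

-- ===== CLAIM (what is proved, stated in full; the proofs are below) =====
def Claim_equal_GetFeatureMapSizeBySelfMax : Prop := ∀ (data_name : String) (max_size : Int × Int) (idex_layer : Int), Dom_GetFeatureMapSizeBySelfMax data_name max_size idex_layer → Pre_GetFeatureMapSizeBySelfMax data_name max_size idex_layer → Spec_GetFeatureMapSizeBySelfMax data_name max_size idex_layer (GetFeatureMapSizeBySelfMax data_name max_size idex_layer)

-- ===== LEMMAS AND PROOFS =====

-- the paired fold is the pair of the component folds
lemma foldl_div_pair (a b : Int) : ∀ (l : List Int) (h w : Int),
    l.foldl (fun hw _ => (PySem.Int.floordiv hw.1 a, PySem.Int.floordiv hw.2 b)) (h, w)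
      = (l.foldl (fun x _ => PySem.Int.floordiv x a) h,
         l.foldl (fun x _ => PySem.Int.floordiv x b) w)
  | [], h, w => rfl
  | _ :: t, h, w => foldl_div_pair a b t _ _

-- n successive floor divisions by a positive m are one floor division by m ^ n
lemma foldl_div_pow (m : Int) (hm : 0 < m) : ∀ (l : List Int) (h : Int), 0 ≤ h →
    l.foldl (fun x _ => PySem.Int.floordiv x m) h = PySem.Int.floordiv h (m ^ l.length) := by
  intro l
  induction l with
  | nil =>
    intro h _
    simp [PySem.Int.floordiv_eq_ediv_of_pos (by norm_num : (0:Int) < 1)]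
  | cons x t ih =>
    intro h hh
    have h1 : PySem.Int.floordiv h m = h / m := PySem.Int.floordiv_eq_ediv_of_pos hm
    have h2 : 0 ≤ h / m := Int.ediv_nonneg hh (le_of_lt hm)
    calc (x :: t).foldl (fun x _ => PySem.Int.floordiv x m) h
        = t.foldl (fun x _ => PySem.Int.floordiv x m) (PySem.Int.floordiv h m) := rfl
      _ = PySem.Int.floordiv (h / m) (m ^ t.length) := by rw [h1, ih _ h2]
      _ = PySem.Int.floordiv h (m ^ (x :: t).length) := by
          rw [PySem.Int.floordiv_eq_ediv_of_pos (pow_pos hm _),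
              PySem.Int.floordiv_eq_ediv_of_pos (pow_pos hm _),
              Int.ediv_ediv_of_nonneg (le_of_lt hm), List.length_cons, pow_succ']

-- capping the exponent at c with h < 2 ^ c changes nothing for a positive base
lemma floordiv_pow_cap (h m : Int) (c n : Nat) (hh : 0 ≤ h) (hm : 0 < m) (hc : h < 2 ^ c) :
    PySem.Int.floordiv h (m ^ n) = PySem.Int.floordiv h (m ^ min n c) := by
  by_cases hle : n ≤ c
  · rw [min_eq_left hle]
  · have hlt : c < n := by omega
    rw [min_eq_right (le_of_lt hlt)]
    rcases eq_or_lt_of_le (by omega : (1:Int) ≤ m) with h1 | h2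
    · rw [← h1]; simp
    · have hm2 : (2 : Int) ≤ m := h2
      have key : ∀ k : Nat, c ≤ k → h / m ^ k = 0 := by
        intro k hk
        refine Int.ediv_eq_zero_of_lt hh (lt_of_lt_of_le hc ?_)
        calc (2 : Int) ^ c ≤ 2 ^ k := pow_le_pow_right₀ (by norm_num) hk
          _ ≤ m ^ k := pow_le_pow_left₀ (by norm_num) hm2 k
      rw [PySem.Int.floordiv_eq_ediv_of_pos (pow_pos hm _),
          PySem.Int.floordiv_eq_ediv_of_pos (pow_pos hm _),
          key n (le_of_lt hlt), key c le_rfl]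

-- the whole equivalence for one concrete (h, w) row of the size table
lemma core_eq (max_size : Int × Int) (idex_layer : Int) (h w : Int)
    (hh : 0 ≤ h) (hw : 0 ≤ w)
    (hch : h < 2 ^ PySem.Int.bitLength h) (hcw : w < 2 ^ PySem.Int.bitLength w)
    (hk : 0 < idex_layer) (ha : 0 < max_size.1) (hb : 0 < max_size.2) :
    (PySem.List.pyRange 0 idex_layer 1).foldl
        (fun hw _ => (PySem.Int.floordiv hw.1 max_size.1, PySem.Int.floordiv hw.2 max_size.2)) (h, w)
      = (PySem.Int.floordiv h (max_size.1 ^ (min idex_layer (PySem.Int.bitLength h : Int)).toNat),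
         PySem.Int.floordiv w (max_size.2 ^ (min idex_layer (PySem.Int.bitLength w : Int)).toNat)) := by
  have hrange : PySem.List.pyRange 0 idex_layer 1 = List.map (fun k : Nat => (k : Int)) (List.range idex_layer.toNat) := by
    conv_lhs => rw [show idex_layer = (idex_layer.toNat : Int) by omega]
    exact PySem.List.pyRange_zero_natCast _
  have hlen : (PySem.List.pyRange 0 idex_layer 1).length = idex_layer.toNat := by
    simp [hrange]
  have hminh : (min idex_layer (PySem.Int.bitLength h : Int)).toNat = min idex_layer.toNat (PySem.Int.bitLength h) := by omega
  have hminw : (min idex_layer (PySem.Int.bitLength w : Int)).toNat = min idex_layer.toNat (PySem.Int.bitLength w) := by omega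
  rw [foldl_div_pair, foldl_div_pow _ ha _ _ hh, foldl_div_pow _ hb _ _ hw, hlen, hminh, hminw,
      floordiv_pow_cap h _ _ _ hh ha hch, floordiv_pow_cap w _ _ _ hw hb hcw]

-- ===== VERDICT (by name: the statement is the Claim_ definition above) =====
theorem GetFeatureMapSizeBySelfMax_spec : Claim_equal_GetFeatureMapSizeBySelfMax := by
  intro data_name max_size idex_layer _ hpre
  obtain ⟨hname, hk, ha, hb⟩ := hpre
  unfold Spec_GetFeatureMapSizeBySelfMax
  rcases hname with h | h | h <;> subst h
  · have hA : GetFeatureMapSizeBySelfMax "ucihar" max_size idex_layer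
        = if idex_layer > 0 then
            (PySem.List.pyRange 0 idex_layer 1).foldl
              (fun hw _ => (PySem.Int.floordiv hw.1 max_size.1, PySem.Int.floordiv hw.2 max_size.2)) (32, 9)
          else (0, 0) := rfl
    have hB : GetFeatureMapSizeBySelfMax_alt "ucihar" max_size idex_layer
        = if idex_layer ≤ 0 then (0, 0)
          else (PySem.Int.floordiv 32 (max_size.1 ^ (min idex_layer (PySem.Int.bitLength 32 : Int)).toNat),
                PySem.Int.floordiv 9 (max_size.2 ^ (min idex_layer (PySem.Int.bitLength 9 : Int)).toNat)) := rfl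
    rw [hA, hB, if_pos hk, if_neg (by omega : ¬ idex_layer ≤ 0)]
    exact core_eq max_size idex_layer 32 9 (by norm_num) (by norm_num) (by decide) (by decide) hk ha hb
  · have hA : GetFeatureMapSizeBySelfMax "motion" max_size idex_layer
        = if idex_layer > 0 then
            (PySem.List.pyRange 0 idex_layer 1).foldl
              (fun hw _ => (PySem.Int.floordiv hw.1 max_size.1, PySem.Int.floordiv hw.2 max_size.2)) (32, 12)
          else (0, 0) := rfl
    have hB : GetFeatureMapSizeBySelfMax_alt "motion" max_size idex_layer
        = if idex_layer ≤ 0 then (0, 0)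
          else (PySem.Int.floordiv 32 (max_size.1 ^ (min idex_layer (PySem.Int.bitLength 32 : Int)).toNat),
                PySem.Int.floordiv 12 (max_size.2 ^ (min idex_layer (PySem.Int.bitLength 12 : Int)).toNat)) := rfl
    rw [hA, hB, if_pos hk, if_neg (by omega : ¬ idex_layer ≤ 0)]
    exact core_eq max_size idex_layer 32 12 (by norm_num) (by norm_num) (by decide) (by decide) hk ha hb
  · have hA : GetFeatureMapSizeBySelfMax "uschad" max_size idex_layer
        = if idex_layer > 0 then
            (PySem.List.pyRange 0 idex_layer 1).foldl
              (fun hw _ => (PySem.Int.floordiv hw.1 max_size.1, PySem.Int.floordiv hw.2 max_size.2)) (32, 6)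
          else (0, 0) := rfl
    have hB : GetFeatureMapSizeBySelfMax_alt "uschad" max_size idex_layer
        = if idex_layer ≤ 0 then (0, 0)
          else (PySem.Int.floordiv 32 (max_size.1 ^ (min idex_layer (PySem.Int.bitLength 32 : Int)).toNat),
                PySem.Int.floordiv 6 (max_size.2 ^ (min idex_layer (PySem.Int.bitLength 6 : Int)).toNat)) := rfl
    rw [hA, hB, if_pos hk, if_neg (by omega : ¬ idex_layer ≤ 0)]
    exact core_eq max_size idex_layer 32 6 (by norm_num) (by norm_num) (by decide) (by decide) hk ha hb
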